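-- pv_equiv track=rewrite | github.com/ITGuyDave-Official/addressconversion | main.py | is_ipv4_binary
-- ===== SOURCE A (Python) =====
-- def is_ipv4_binary(address):
--     parts = address.strip().split('.')
--     if len(parts) != 4:
--         return False
--     for part in parts:
--         if len(part) !=8:
--             return False
--         if not all(c in '01' for c in part):
--             return False
--     return True
-- ===== SOURCE B (Python) =====
-- def is_ipv4_binary(address):
--     s = address.strip()
--     return len(s) == 35 and all(
--         ((c == '.') == (i % 9 == 8)) and c in '01.'
--         for i, c in enumerate(s))
-- ===== Notes on version B (the rewrite author's own statement) =====
-- stated objective: alternative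
-- what changed: B drops A's split-on-dot-then-per-part loop and instead makes a single enumerate pass over the stripped string, checking length 35 and a positional rule (separator exactly at indices congruent to 8 mod 9, every other character a binary digit).
import Mathlib
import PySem

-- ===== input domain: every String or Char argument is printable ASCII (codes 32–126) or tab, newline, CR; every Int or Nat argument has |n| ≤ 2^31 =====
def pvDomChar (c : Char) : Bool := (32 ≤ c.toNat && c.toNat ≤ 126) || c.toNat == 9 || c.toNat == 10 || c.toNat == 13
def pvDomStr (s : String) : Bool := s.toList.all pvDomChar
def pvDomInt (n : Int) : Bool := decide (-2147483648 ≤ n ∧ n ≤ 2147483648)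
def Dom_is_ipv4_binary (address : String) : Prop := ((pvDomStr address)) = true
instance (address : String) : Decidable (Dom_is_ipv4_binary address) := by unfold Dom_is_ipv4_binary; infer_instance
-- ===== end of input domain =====

-- B replaces A's split-then-per-part loop by a single enumerate pass with a positional rule
-- (a dot exactly at indices ≡ 8 mod 9 of the 35-char stripped string); objective: alternative, same cost.

-- ===== PORT A =====
-- A's early-return for-loop over the parts, transliterated as structural recursion
def pvCheckParts (parts : List (List Char)) : Bool :=
  match parts with
  | [] => true
  | p :: rest =>
    if p.length ≠ 8 then false
    else if ¬ (p.all (fun ch => PySem.Chars.isIn [ch] ['0', '1']) = true) then false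
    else pvCheckParts rest

def is_ipv4_binary (address : String) : Bool :=
  let parts := PySem.Chars.splitOn (PySem.Chars.strip address.toList) ['.']
  if parts.length ≠ 4 then false
  else pvCheckParts parts

-- ===== PORT B =====
def is_ipv4_binary_alt (address : String) : Bool :=
  let s := PySem.Chars.strip address.toList
  (s.length == 35) && (PySem.List.enumerate s 0).all (fun p =>
    ((p.2 == '.') == (PySem.Int.mod p.1 9 == 8)) && PySem.Chars.isIn [p.2] ['0', '1', '.'])

-- ===== PRECONDITION & SPEC =====
def Spec_is_ipv4_binary (address : String) (out : Bool) : Prop := out = is_ipv4_binary_alt address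
instance (address : String) (out : Bool) : Decidable (Spec_is_ipv4_binary address out) := by unfold Spec_is_ipv4_binary; infer_instance

-- ===== CLAIM (what is proved, stated in full; the proofs are below) =====
def Claim_equal_is_ipv4_binary : Prop := ∀ (address : String), Dom_is_ipv4_binary address → Spec_is_ipv4_binary address (is_ipv4_binary address)

-- ===== LEMMAS AND PROOFS =====

-- structural model of s.split('.')
def pvGs : List Char → List (List Char)
  | [] => [[]]
  | ch :: t => if ch = '.' then [] :: pvGs t
               else (ch :: (pvGs t).headD []) :: (pvGs t).tail

lemma pvGs_ne_nil (l : List Char) : pvGs l ≠ [] := by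
  cases l with
  | nil => simp [pvGs]
  | cons ch t => simp only [pvGs]; split <;> simp

lemma pvGo (fuel : Nat) : ∀ (l cur : List Char) (acc : List (List Char)), l.length ≤ fuel →
    PySem.Chars.splitOn.go ['.'] fuel l cur acc
      = acc.reverse ++ (cur.reverse ++ (pvGs l).headD []) :: (pvGs l).tail := by
  induction fuel with
  | zero =>
    intro l cur acc h
    have hl : l = [] := by cases l <;> simp_all
    subst hl
    simp [PySem.Chars.splitOn.go, pvGs]
  | succ f ih =>
    intro l cur acc h
    cases l with
    | nil => simp [PySem.Chars.splitOn.go, pvGs]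
    | cons ch t =>
      by_cases hc : ch = '.'
      · subst hc
        have hstep : PySem.Chars.splitOn.go ['.'] (f + 1) ('.' :: t) cur acc
            = PySem.Chars.splitOn.go ['.'] f t [] (cur.reverse :: acc) := by
          simp [PySem.Chars.splitOn.go, List.isPrefixOf]
        rw [hstep, ih t [] (cur.reverse :: acc) (by simpa using h)]
        have := pvGs_ne_nil t
        cases hgs : pvGs t with
        | nil => exact absurd hgs this
        | cons q qs => simp [pvGs, hgs]
      · have hstep : PySem.Chars.splitOn.go ['.'] (f + 1) (ch :: t) cur acc
            = PySem.Chars.splitOn.go ['.'] f t (ch :: cur) acc := by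
          simp [PySem.Chars.splitOn.go, List.isPrefixOf]
          intro e
          exact absurd e.symm hc
        rw [hstep, ih t (ch :: cur) acc (by simpa using h)]
        simp [pvGs, hc]

lemma pvSplitOn_eq (s : List Char) : PySem.Chars.splitOn s ['.'] = pvGs s := by
  have h := pvGo (s.length + 1) s [] [] (by omega)
  have hne := pvGs_ne_nil s
  unfold PySem.Chars.splitOn
  rw [h]
  cases hgs : pvGs s with
  | nil => exact absurd hgs hne
  | cons p ps => simp

lemma pvGs_no_dot (p : List Char) (h : '.' ∉ p) : pvGs p = [p] := by
  induction p with
  | nil => simp [pvGs]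
  | cons ch t ih =>
    have hch : ch ≠ '.' := fun e => h (e ▸ List.mem_cons_self)
    have ht : '.' ∉ t := fun m => h (List.mem_cons_of_mem ch m)
    simp [pvGs, hch, ih ht]

lemma pvGs_append (p r : List Char) (h : '.' ∉ p) :
    pvGs (p ++ '.' :: r) = p :: pvGs r := by
  induction p with
  | nil => simp [pvGs]
  | cons ch t ih =>
    have hch : ch ≠ '.' := fun e => h (e ▸ List.mem_cons_self)
    have ht : '.' ∉ t := fun m => h (List.mem_cons_of_mem ch m)
    simp [pvGs, hch, ih ht]

-- join is a left inverse of pvGs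
def pvJ : List (List Char) → List Char
  | [] => []
  | [p] => p
  | p :: ps => p ++ '.' :: pvJ ps

lemma pvJ_cons (p : List Char) (ps : List (List Char)) (h : ps ≠ []) :
    pvJ (p :: ps) = p ++ '.' :: pvJ ps := by
  cases ps with
  | nil => exact absurd rfl h
  | cons q qs => rfl

lemma pvJ_gs (s : List Char) : pvJ (pvGs s) = s := by
  induction s with
  | nil => simp [pvGs, pvJ]
  | cons ch t ih =>
    by_cases hc : ch = '.'
    · subst hc
      rw [show pvGs ('.' :: t) = [] :: pvGs t from by simp [pvGs]]
      rw [pvJ_cons _ _ (pvGs_ne_nil t), ih]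
      simp
    · simp only [pvGs, if_neg hc]
      cases hgs : pvGs t with
      | nil => exact absurd hgs (pvGs_ne_nil t)
      | cons q qs =>
        rw [hgs] at ih
        cases qs with
        | nil =>
          simp only [List.headD, List.tail_cons]
          simp only [pvJ] at ih ⊢
          rw [ih]
        | cons q2 qs2 =>
          simp only [List.headD, List.tail_cons]
          rw [pvJ_cons _ _ (by simp)] at ih ⊢
          rw [List.cons_append, ih]

-- singleton containment is membership
lemma pvIsIn_singleton (ch : Char) (l : List Char) :
    PySem.Chars.isIn [ch] l = true ↔ ch ∈ l := by
  rw [PySem.Chars.isIn_iff_infix]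
  constructor
  · intro h
    exact h.subset (List.mem_singleton_self ch)
  · intro h
    obtain ⟨u, v, rfl⟩ := List.append_of_mem h
    exact ⟨u, v, by simp⟩

lemma pvNoDot (p : List Char)
    (h : p.all (fun ch => PySem.Chars.isIn [ch] ['0', '1']) = true) : '.' ∉ p := by
  intro hm
  have h2 := List.all_eq_true.mp h '.' hm
  rw [pvIsIn_singleton] at h2
  simp at h2

-- the common specification: four dot-separated 8-char binary groups
def pvOk (p : List Char) : Prop :=
  p.length = 8 ∧ p.all (fun ch => PySem.Chars.isIn [ch] ['0', '1']) = true

def pvP (s : List Char) : Prop :=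
  ∃ p1 p2 p3 p4 : List Char,
    s = p1 ++ '.' :: (p2 ++ '.' :: (p3 ++ '.' :: p4)) ∧ pvOk p1 ∧ pvOk p2 ∧ pvOk p3 ∧ pvOk p4

lemma pvLen4 {α : Type} (l : List α) (h : l.length = 4) :
    ∃ x1 x2 x3 x4, l = [x1, x2, x3, x4] := by
  rcases l with _ | ⟨x1, _ | ⟨x2, _ | ⟨x3, _ | ⟨x4, _ | ⟨x5, t⟩⟩⟩⟩⟩ <;> simp_all

lemma pvLen8 {α : Type} (l : List α) (h : l.length = 8) :
    ∃ x1 x2 x3 x4 x5 x6 x7 x8, l = [x1, x2, x3, x4, x5, x6, x7, x8] := by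
  rcases l with _ | ⟨x1, _ | ⟨x2, _ | ⟨x3, _ | ⟨x4, _ | ⟨x5, _ | ⟨x6, _ | ⟨x7, _ | ⟨x8, _ | ⟨x9, t⟩⟩⟩⟩⟩⟩⟩⟩⟩ <;> simp_all

lemma pvLen35 {α : Type} (l : List α) (h : l.length = 35) :
    ∃ c0 c1 c2 c3 c4 c5 c6 c7 c8 c9 c10 c11 c12 c13 c14 c15 c16 c17 c18 c19 c20 c21 c22 c23 c24 c25 c26 c27 c28 c29 c30 c31 c32 c33 c34, l = [c0, c1, c2, c3, c4, c5, c6, c7, c8, c9, c10, c11, c12, c13, c14, c15, c16, c17, c18, c19, c20, c21, c22, c23, c24, c25, c26, c27, c28, c29, c30, c31, c32, c33, c34] := by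
  rcases l with _ | ⟨y0, _ | ⟨x1, _ | ⟨x2, _ | ⟨x3, _ | ⟨x4, _ | ⟨x5, _ | ⟨x6, _ | ⟨x7, _ | ⟨x8, _ | ⟨x9, _ | ⟨x10, _ | ⟨x11, _ | ⟨x12, _ | ⟨x13, _ | ⟨x14, _ | ⟨x15, _ | ⟨x16, _ | ⟨x17, _ | ⟨x18, _ | ⟨x19, _ | ⟨x20, _ | ⟨x21, _ | ⟨x22, _ | ⟨x23, _ | ⟨x24, _ | ⟨x25, _ | ⟨x26, _ | ⟨x27, _ | ⟨x28, _ | ⟨x29, _ | ⟨x30, _ | ⟨x31, _ | ⟨x32, _ | ⟨x33, _ | ⟨x34, _ | ⟨x35, t⟩⟩⟩⟩⟩⟩⟩⟩⟩⟩⟩⟩⟩⟩⟩⟩⟩⟩⟩⟩⟩⟩⟩⟩⟩⟩⟩⟩⟩⟩⟩⟩⟩⟩⟩⟩ <;> simp_all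

lemma pvMod9 (a : Int) : PySem.Int.mod a 9 = a % 9 :=
  PySem.Int.mod_eq_emod_of_pos (by norm_num)

-- A's check = true iff the specification holds
lemma pvA_iff (s : List Char) :
    (if (PySem.Chars.splitOn s ['.']).length ≠ 4 then false
     else pvCheckParts (PySem.Chars.splitOn s ['.'])) = true ↔ pvP s := by
  rw [pvSplitOn_eq]
  constructor
  · intro h
    have hlen : (pvGs s).length = 4 := by
      by_contra hne
      simp [hne] at h
    rw [if_neg (by simp [hlen])] at h
    obtain ⟨p1, p2, p3, p4, hgs⟩ := pvLen4 _ hlen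
    rw [hgs] at h
    have hs : s = p1 ++ '.' :: (p2 ++ '.' :: (p3 ++ '.' :: p4)) := by
      have hj := pvJ_gs s
      rw [hgs] at hj
      simp only [pvJ] at hj
      exact hj.symm
    simp only [pvCheckParts] at h
    split_ifs at h with h1 h2 h3 h4 h5 h6 h7 h8
    refine ⟨p1, p2, p3, p4, hs, ⟨?_, ?_⟩, ⟨?_, ?_⟩, ⟨?_, ?_⟩, ⟨?_, ?_⟩⟩ <;> tauto
  · rintro ⟨p1, p2, p3, p4, rfl, ⟨hl1, hb1⟩, ⟨hl2, hb2⟩, ⟨hl3, hb3⟩, ⟨hl4, hb4⟩⟩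
    rw [pvGs_append _ _ (pvNoDot _ hb1), pvGs_append _ _ (pvNoDot _ hb2),
        pvGs_append _ _ (pvNoDot _ hb3), pvGs_no_dot _ (pvNoDot _ hb4)]
    simp [pvCheckParts, hl1, hl2, hl3, hl4, hb1, hb2, hb3, hb4]

lemma pvMem2 {c : Char} (h1 : ¬ c = '.') (h2 : c = '0' ∨ c = '1' ∨ c = '.') :
    c = '0' ∨ c = '1' := by tauto

lemma pvBinNeDot {c : Char} (h : c = '0' ∨ c = '1') : (c = '.') = False := by
  rcases h with rfl | rfl <;> simp

-- B's check = true iff the specification holds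
lemma pvB_iff (s : List Char) :
    ((s.length == 35) && (PySem.List.enumerate s 0).all (fun p =>
      ((p.2 == '.') == (PySem.Int.mod p.1 9 == 8)) && PySem.Chars.isIn [p.2] ['0', '1', '.'])) = true
      ↔ pvP s := by
  constructor
  · intro h
    simp only [Bool.and_eq_true, beq_iff_eq] at h
    obtain ⟨hlen, hall⟩ := h
    obtain ⟨c0, c1, c2, c3, c4, c5, c6, c7, c8, c9, c10, c11, c12, c13, c14, c15, c16, c17, c18, c19, c20, c21, c22, c23, c24, c25, c26, c27, c28, c29, c30, c31, c32, c33, c34, rfl⟩ := pvLen35 s hlen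
    norm_num [PySem.List.enumerate_cons, PySem.List.enumerate_nil, List.all_cons, List.all_nil,
      pvMod9, pvIsIn_singleton] at hall
    obtain ⟨h0, h1, h2, h3, h4, h5, h6, h7, h8, h9, h10, h11, h12, h13, h14, h15, h16, h17, h18, h19, h20, h21, h22, h23, h24, h25, h26, h27, h28, h29, h30, h31, h32, h33, h34⟩ := hall
    refine ⟨[c0, c1, c2, c3, c4, c5, c6, c7], [c9, c10, c11, c12, c13, c14, c15, c16], [c18, c19, c20, c21, c22, c23, c24, c25], [c27, c28, c29, c30, c31, c32, c33, c34], ?_, ?_, ?_, ?_, ?_⟩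
    · simp [h8.1, h17.1, h26.1]
    · constructor
      · simp
      · simp only [List.all_cons, List.all_nil, Bool.and_eq_true, pvIsIn_singleton,
          List.mem_cons, List.not_mem_nil, or_false, and_true]
        exact ⟨pvMem2 h0.1 h0.2, pvMem2 h1.1 h1.2, pvMem2 h2.1 h2.2, pvMem2 h3.1 h3.2, pvMem2 h4.1 h4.2, pvMem2 h5.1 h5.2, pvMem2 h6.1 h6.2, pvMem2 h7.1 h7.2⟩
    · constructor
      · simp
      · simp only [List.all_cons, List.all_nil, Bool.and_eq_true, pvIsIn_singleton,
          List.mem_cons, List.not_mem_nil, or_false, and_true]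
        exact ⟨pvMem2 h9.1 h9.2, pvMem2 h10.1 h10.2, pvMem2 h11.1 h11.2, pvMem2 h12.1 h12.2, pvMem2 h13.1 h13.2, pvMem2 h14.1 h14.2, pvMem2 h15.1 h15.2, pvMem2 h16.1 h16.2⟩
    · constructor
      · simp
      · simp only [List.all_cons, List.all_nil, Bool.and_eq_true, pvIsIn_singleton,
          List.mem_cons, List.not_mem_nil, or_false, and_true]
        exact ⟨pvMem2 h18.1 h18.2, pvMem2 h19.1 h19.2, pvMem2 h20.1 h20.2, pvMem2 h21.1 h21.2, pvMem2 h22.1 h22.2, pvMem2 h23.1 h23.2, pvMem2 h24.1 h24.2, pvMem2 h25.1 h25.2⟩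
    · constructor
      · simp
      · simp only [List.all_cons, List.all_nil, Bool.and_eq_true, pvIsIn_singleton,
          List.mem_cons, List.not_mem_nil, or_false, and_true]
        exact ⟨pvMem2 h27.1 h27.2, pvMem2 h28.1 h28.2, pvMem2 h29.1 h29.2, pvMem2 h30.1 h30.2, pvMem2 h31.1 h31.2, pvMem2 h32.1 h32.2, pvMem2 h33.1 h33.2, pvMem2 h34.1 h34.2⟩
  · rintro ⟨p1, p2, p3, p4, rfl, ⟨hl1, hb1⟩, ⟨hl2, hb2⟩, ⟨hl3, hb3⟩, ⟨hl4, hb4⟩⟩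
    obtain ⟨a0, a1, a2, a3, a4, a5, a6, a7, rfl⟩ := pvLen8 p1 hl1
    obtain ⟨b0, b1, b2, b3, b4, b5, b6, b7, rfl⟩ := pvLen8 p2 hl2
    obtain ⟨e0, e1, e2, e3, e4, e5, e6, e7, rfl⟩ := pvLen8 p3 hl3
    obtain ⟨d0, d1, d2, d3, d4, d5, d6, d7, rfl⟩ := pvLen8 p4 hl4
    simp only [List.all_cons, List.all_nil, Bool.and_eq_true, pvIsIn_singleton,
      List.mem_cons, List.not_mem_nil, or_false] at hb1 hb2 hb3 hb4
    norm_num [PySem.List.enumerate_cons, PySem.List.enumerate_nil, List.all_cons, List.all_nil,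
      pvMod9, pvIsIn_singleton]
    simp_all [pvBinNeDot]

-- ===== VERDICT (by name: the statement is the Claim_ definition above) =====
theorem is_ipv4_binary_spec : Claim_equal_is_ipv4_binary := by
  intro address _
  unfold Spec_is_ipv4_binary is_ipv4_binary is_ipv4_binary_alt
  rw [Bool.eq_iff_iff, pvA_iff, pvB_iff]
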